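-- pv_equiv track=rewrite | github.com/miliar/Code_Jam_Webscraper | solutions_python/Problem_184/1628.py | is_digit
-- ===== SOURCE A (Python) =====
-- def is_digit(str_digit, str_input):
--
--         if len(str_digit) == 0:
--             return True, str_input
--
--         if str_digit[0] in str_input:
--             new_input = str_input.replace(str_digit[0], "", 1)
--             return is_digit(str_digit[1:],new_input)
--         else:
--             return False, ""
-- ===== SOURCE B (Python) =====
-- def is_digit(str_digit, str_input):
--     # counting approach: O(len(str_digit)+len(str_input)) instead of repeated replace
--     need = {}
--     for c in str_digit:
--         need[c] = need.get(c, 0) + 1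
--     have = {}
--     for c in str_input:
--         have[c] = have.get(c, 0) + 1
--     for c, k in need.items():
--         if have.get(c, 0) < k:
--             return False, ''
--     out = []
--     for ch in str_input:
--         if need.get(ch, 0) > 0:
--             need[ch] -= 1
--         else:
--             out.append(ch)
--     return True, ''.join(out)
-- ===== Notes on version B (the rewrite author's own statement) =====
-- stated objective: faster
-- what changed: Replaces the tail recursion that repeatedly scans and rebuilds the input with replace(c,'',1) by two frequency dictionaries: count the digit chars, check feasibility against the input's counts, then one left-to-right pass over the input keeps each char whose remaining needed count is zero.
import Mathlib
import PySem

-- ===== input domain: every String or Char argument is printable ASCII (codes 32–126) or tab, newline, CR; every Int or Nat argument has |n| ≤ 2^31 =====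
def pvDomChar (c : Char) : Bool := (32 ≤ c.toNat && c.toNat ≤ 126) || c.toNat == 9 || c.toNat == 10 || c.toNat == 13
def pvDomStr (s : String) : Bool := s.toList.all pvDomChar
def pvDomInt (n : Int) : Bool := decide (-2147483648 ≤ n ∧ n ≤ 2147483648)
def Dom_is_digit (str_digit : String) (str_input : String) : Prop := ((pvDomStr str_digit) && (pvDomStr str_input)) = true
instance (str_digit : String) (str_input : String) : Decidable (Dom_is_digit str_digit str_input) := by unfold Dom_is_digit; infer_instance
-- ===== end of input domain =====

-- B replaces A's recursive replace(c,'',1) chain by frequency counting plus one pass over the input (measurably faster on large inputs).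


-- ===== PORT A =====
-- recursion on the digit list; str_input.replace(str_digit[0], "", 1) for a single-char
-- pattern and empty replacement is exactly "remove the first occurrence" = List.erase.
def isDigitAuxA : List Char → List Char → Bool × List Char
  | [], inp => (true, inp)
  | c :: rest, inp =>
    if PySem.Chars.isIn [c] inp then isDigitAuxA rest (inp.erase c)
    else (false, [])

def is_digit (str_digit : String) (str_input : String) : Bool × String :=
  let r := isDigitAuxA str_digit.toList str_input.toList
  (r.1, String.ofList r.2)

-- ===== PORT B =====
-- dict-building loop: need[c] = need.get(c, 0) + 1
def bCount (cs : List Char) : PySem.Dict Char Int :=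
  cs.foldl (fun d c => d.insert c (d.getD c 0 + 1)) PySem.Dict.empty

-- feasibility loop over need.items() with early return
def bCheck (haveD : PySem.Dict Char Int) : List (Char × Int) → Bool
  | [] => true
  | (c, k) :: rest => if haveD.getD c 0 < k then false else bCheck haveD rest

-- the one-pass scan over str_input with the out accumulator
def bScan : List Char → PySem.Dict Char Int → List Char → List Char
  | [], _, out => out
  | ch :: t, need, out =>
    if need.getD ch 0 > 0 then bScan t (need.insert ch (need.getD ch 0 - 1)) out
    else bScan t need (out ++ [ch])

def is_digit_alt (str_digit : String) (str_input : String) : Bool × String :=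
  let need := bCount str_digit.toList
  let haveD := bCount str_input.toList
  if bCheck haveD need.items then
    (true, String.ofList (bScan str_input.toList need []))
  else (false, "")

-- ===== PRECONDITION & SPEC =====
def Spec_is_digit (str_digit : String) (str_input : String) (out : Bool × String) : Prop := out = is_digit_alt str_digit str_input
instance (str_digit : String) (str_input : String) (out : Bool × String) : Decidable (Spec_is_digit str_digit str_input out) := by unfold Spec_is_digit; infer_instance

-- ===== CLAIM (what is proved, stated in full; the proofs are below) =====
def Claim_equal_is_digit : Prop := ∀ (str_digit : String) (str_input : String), Dom_is_digit str_digit str_input → Spec_is_digit str_digit str_input (is_digit str_digit str_input)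

-- ===== LEMMAS AND PROOFS =====

-- abstract need as a function Char → Int
def fscan : List Char → (Char → Int) → List Char
  | [], _ => []
  | ch :: t, n =>
    if n ch > 0 then fscan t (fun x => if x = ch then n x - 1 else n x)
    else ch :: fscan t n

def SubM (ds inp : List Char) : Prop := ∀ c, ds.count c ≤ inp.count c

theorem isIn_singleton (c : Char) (inp : List Char) :
    PySem.Chars.isIn [c] inp = true ↔ c ∈ inp := by
  rw [PySem.Chars.isIn_iff_infix]
  constructor
  · rintro ⟨s, t, h⟩; subst h; simp
  · intro h
    obtain ⟨s, t, h⟩ := List.append_of_mem h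
    exact ⟨s, t, by simp [h]⟩

theorem getD_bCount (cs : List Char) (c : Char) :
    (bCount cs).getD c 0 = (cs.count c : Int) := by
  unfold bCount
  rw [PySem.Dict.getD_foldl_insert_add_one]
  simp

theorem items_bCount (cs : List Char) :
    (bCount cs).items = (PySem.Set.ofList cs).map (fun k => (k, (cs.count k : Int))) := by
  unfold bCount
  rw [PySem.Dict.foldl_insert_getD_add_one_eq_counter, PySem.Dict.items_counter]

theorem bCheck_iff (h : PySem.Dict Char Int) (L : List (Char × Int)) :
    bCheck h L = true ↔ ∀ p ∈ L, ¬ (h.getD p.1 0 < p.2) := by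
  induction L with
  | nil => simp [bCheck]
  | cons p rest ih =>
    obtain ⟨c, k⟩ := p
    by_cases hc : h.getD c 0 < k
    · simp [bCheck, hc]
    · simp [bCheck, hc, ih]
      intro _
      omega

theorem bScan_eq_fscan (inp : List Char) :
    ∀ (need : PySem.Dict Char Int) (out : List Char),
    bScan inp need out = out ++ fscan inp (fun c => need.getD c 0) := by
  induction inp with
  | nil => intro need out; simp [bScan, fscan]
  | cons ch t ih =>
    intro need out
    by_cases hc : need.getD ch 0 > 0
    · rw [bScan, if_pos hc, ih, fscan, if_pos hc]
      congr 1
      apply congrArg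
      funext x
      rw [PySem.Dict.getD_insert]
      by_cases hx : x = ch <;> simp [hx]
    · rw [bScan, if_neg hc, ih, fscan, if_neg hc]
      simp

theorem fscan_nonpos (inp : List Char) (n : Char → Int) (hn : ∀ x, n x ≤ 0) :
    fscan inp n = inp := by
  induction inp with
  | nil => rfl
  | cons ch t ih => rw [fscan, if_neg (by have := hn ch; omega)]; rw [ih]

theorem fscan_bump (inp : List Char) :
    ∀ (n : Char → Int) (c : Char), c ∈ inp → (∀ x, 0 ≤ n x) →
    fscan inp (fun x => if x = c then n x + 1 else n x) = fscan (inp.erase c) n := by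
  induction inp with
  | nil => intro n c hc; exact absurd hc (List.not_mem_nil)
  | cons h t ih =>
    intro n c hc hn
    by_cases hhc : h = c
    · subst hhc
      rw [List.erase_cons_head]
      rw [fscan, if_pos (by have := hn h; simp; omega)]
      have : (fun x => if x = h then (if x = h then n x + 1 else n x) - 1 else if x = h then n x + 1 else n x) = n := by
        funext x
        by_cases hx : x = h
        · simp [hx]
        · simp [hx]
      rw [this]
    · rw [List.erase_cons_tail (by simp [hhc])]
      have hct : c ∈ t := by
        rcases List.mem_cons.mp hc with h1 | h1
        · exact absurd h1.symm hhc
        · exact h1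
      by_cases hh : n h > 0
      · rw [fscan, if_pos (by simp only [if_neg hhc]; exact hh)]
        rw [fscan, if_pos hh]
        have heq : (fun x => if x = h then (if x = c then n x + 1 else n x) - 1 else (if x = c then n x + 1 else n x))
             = (fun x => if x = c then (fun y => if y = h then n y - 1 else n y) x + 1 else (fun y => if y = h then n y - 1 else n y) x) := by
          funext x
          have hch : ¬ c = h := fun e => hhc e.symm
          by_cases hx : x = h
          · subst hx; simp [if_neg hhc]
          · by_cases hx2 : x = c
            · subst hx2; simp [hx]
            · simp [hx, hx2]
        rw [heq, ih _ _ hct (by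
          intro x
          by_cases hx : x = h
          · subst hx; simp; omega
          · simp [hx]; exact hn x)]
      · rw [fscan, if_neg (by simp only [if_neg hhc]; exact hh)]
        rw [fscan, if_neg hh]
        rw [ih _ _ hct hn]

theorem cnt_cons_fun (c : Char) (rest : List Char) :
    (fun x => ((List.count x (c :: rest) : Nat) : Int))
      = (fun x => if x = c then ((List.count x rest : Nat) : Int) + 1 else ((List.count x rest : Nat) : Int)) := by
  funext x
  by_cases hx : x = c
  · subst hx; simp [List.count_cons_self]
  · simp [List.count_cons_of_ne (Ne.symm hx), hx]

theorem A_true (ds : List Char) :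
    ∀ inp, SubM ds inp →
    isDigitAuxA ds inp = (true, fscan inp (fun x => (ds.count x : Int))) := by
  induction ds with
  | nil =>
    intro inp _
    rw [isDigitAuxA, fscan_nonpos inp _ (fun x => by simp)]
  | cons c rest ih =>
    intro inp hsub
    have hcnt := hsub c
    rw [List.count_cons_self] at hcnt
    have hc : c ∈ inp := List.count_pos_iff.mp (by omega)
    rw [isDigitAuxA, if_pos ((isIn_singleton c inp).mpr hc)]
    have hsub' : SubM rest (inp.erase c) := by
      intro x
      by_cases hx : x = c
      · subst hx
        rw [List.count_erase_self]
        omega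
      · have := hsub x
        rw [List.count_cons_of_ne (Ne.symm hx)] at this
        rw [List.count_erase_of_ne hx]
        omega
    rw [ih _ hsub']
    rw [cnt_cons_fun, fscan_bump inp _ c hc (by intro x; simp)]

theorem A_false (ds : List Char) :
    ∀ inp, ¬ SubM ds inp → isDigitAuxA ds inp = (false, []) := by
  induction ds with
  | nil =>
    intro inp h
    exact absurd (fun c => by simp) h
  | cons c rest ih =>
    intro inp hsub
    by_cases hc : c ∈ inp
    · rw [isDigitAuxA, if_pos ((isIn_singleton c inp).mpr hc)]
      apply ih
      intro hs
      apply hsub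
      intro x
      have hpos := List.count_pos_iff.mpr hc
      by_cases hx : x = c
      · subst hx
        have := hs x
        rw [List.count_erase_self] at this
        rw [List.count_cons_self]
        omega
      · have := hs x
        rw [List.count_erase_of_ne hx] at this
        rw [List.count_cons_of_ne (Ne.symm hx)]
        omega
    · rw [isDigitAuxA, if_neg (by
        intro h
        exact hc ((isIn_singleton c inp).mp h))]

theorem bCheck_sub (ds inp : List Char) :
    bCheck (bCount inp) (bCount ds).items = true ↔ SubM ds inp := by
  rw [bCheck_iff, items_bCount]
  constructor
  · intro h c
    by_cases hc : c ∈ ds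
    · have := h (c, (ds.count c : Int)) (by
        simp only [List.mem_map]
        exact ⟨c, (PySem.Set.mem_ofList _ _).mpr hc, rfl⟩)
      rw [getD_bCount] at this
      simp at this
      omega
    · simp [List.count_eq_zero_of_not_mem hc]
  · intro h p hp
    simp only [List.mem_map] at hp
    obtain ⟨k, _, rfl⟩ := hp
    rw [getD_bCount]
    have := h k
    simp
    omega

-- ===== VERDICT (by name: the statement is the Claim_ definition above) =====
theorem is_digit_spec : Claim_equal_is_digit := by
  intro str_digit str_input _
  unfold Spec_is_digit is_digit is_digit_alt
  by_cases hsub : SubM str_digit.toList str_input.toList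
  · rw [if_pos ((bCheck_sub _ _).mpr hsub)]
    rw [A_true _ _ hsub]
    rw [bScan_eq_fscan]
    simp only [List.nil_append]
    have : (fun c => (bCount str_digit.toList).getD c 0)
         = (fun x => ((str_digit.toList.count x : Nat) : Int)) := by
      funext x; rw [getD_bCount]
    rw [this]
  · rw [if_neg (by rw [bCheck_sub]; exact hsub)]
    rw [A_false _ _ hsub]
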